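-- pv_equiv track=rewrite | github.com/TomasOrtega/Hardwood-Heuristics | src/generate_docs.py | _consecutive_positive_windows
-- ===== SOURCE A (Python) =====
-- from typing import Dict, List, Optional
--
-- def _consecutive_positive_windows(
--     sweep: List[Dict],
-- ) -> List[tuple[int, int]]:
--     """
--     Return a list of (low_sec, high_sec) ranges where ev_gain > 0,
--     identifying consecutive blocks in the sorted sweep.
--     """
--     sorted_sweep = sorted(sweep, key=lambda e: e["seconds_remaining"])
--     windows: List[tuple[int, int]] = []
--     in_window = False
--     window_start = 0
--     for entry in sorted_sweep:
--         sec = entry["seconds_remaining"]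
--         if entry["ev_gain"] > 0 and not in_window:
--             in_window = True
--             window_start = sec
--         elif entry["ev_gain"] <= 0 and in_window:
--             in_window = False
--             windows.append((window_start, prev_sec))  # type: ignore[possibly-undefined]
--         prev_sec = sec
--     if in_window:
--         windows.append((window_start, prev_sec))  # type: ignore[possibly-undefined]
--     return windows
-- ===== SOURCE B (Python) =====
-- from typing import Dict, List
--
--
-- def _consecutive_positive_windows(
--     sweep: List[Dict],
-- ) -> List[tuple[int, int]]:
--     """Run-scan over the sorted sweep: jump over each maximal positive run
--     and emit its (first, last) seconds_remaining; no in_window/prev_sec state."""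
--     s = sorted(sweep, key=lambda e: e["seconds_remaining"])
--     n = len(s)
--     windows: List[tuple[int, int]] = []
--     i = 0
--     while i < n:
--         if s[i]["ev_gain"] > 0:
--             j = i
--             while j + 1 < n and s[j + 1]["ev_gain"] > 0:
--                 j += 1
--             windows.append((s[i]["seconds_remaining"], s[j]["seconds_remaining"]))
--             i = j + 2  # s[j+1] (if any) is non-positive; skip it
--         else:
--             i += 1
--     return windows
-- ===== Notes on version B (the rewrite author's own statement) =====
-- stated objective: simpler
-- what changed: Replaced A's in_window/prev_sec flag state machine over the sorted sweep by a run-scan that jumps over each maximal positive run and emits its first and last seconds_remaining directly.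
import Mathlib
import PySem

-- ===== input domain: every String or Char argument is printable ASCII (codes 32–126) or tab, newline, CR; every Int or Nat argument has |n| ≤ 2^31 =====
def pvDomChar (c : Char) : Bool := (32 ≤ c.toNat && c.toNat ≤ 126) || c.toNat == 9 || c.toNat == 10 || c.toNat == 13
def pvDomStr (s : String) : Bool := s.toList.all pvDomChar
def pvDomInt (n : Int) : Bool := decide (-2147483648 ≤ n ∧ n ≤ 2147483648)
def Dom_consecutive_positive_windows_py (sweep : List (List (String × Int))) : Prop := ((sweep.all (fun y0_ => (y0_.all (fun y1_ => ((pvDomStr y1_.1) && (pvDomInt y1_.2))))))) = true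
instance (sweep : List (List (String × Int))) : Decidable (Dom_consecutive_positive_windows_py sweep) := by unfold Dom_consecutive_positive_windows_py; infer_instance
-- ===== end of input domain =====

-- B replaces A's in_window/prev_sec state machine by a run-scan over the sorted
-- sweep (jump over each maximal positive run, emit its first/last second): simpler decomposition, same cost.

-- ===== PORT A =====
-- entry["seconds_remaining"] / entry["ev_gain"]; default 0 is never used under Pre_ (Python raises KeyError there)
def pvSec (e : List (String × Int)) : Int := (PySem.Dict.mk e).getD "seconds_remaining" 0
def pvGain (e : List (String × Int)) : Int := (PySem.Dict.mk e).getD "ev_gain" 0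

-- state = (windows, in_window, window_start, prev_sec)
def pvStepA (st : List (Int × Int) × Bool × Int × Int) (entry : List (String × Int)) :
    List (Int × Int) × Bool × Int × Int :=
  let sec := pvSec entry
  if pvGain entry > 0 ∧ st.2.1 = false then (st.1, true, sec, sec)
  else if pvGain entry ≤ 0 ∧ st.2.1 = true then
    (st.1 ++ [(st.2.2.1, st.2.2.2)], false, st.2.2.1, sec)
  else (st.1, st.2.1, st.2.2.1, sec)

def consecutive_positive_windows_py (sweep : List (List (String × Int))) : List (Int × Int) :=
  let st := (PySem.List.sorted sweep pvSec false).foldl pvStepA ([], false, 0, 0)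
  if st.2.1 then st.1 ++ [(st.2.2.1, st.2.2.2)] else st.1

-- ===== PORT B =====
def pvPos (e : List (String × Int)) : Bool := decide (pvGain e > 0)

-- the outer while loop of Source B; the inner j-loop is the takeWhile/foldl over the positive run
def pvScan : List (List (String × Int)) → List (Int × Int)
  | [] => []
  | e :: rest =>
    if pvPos e then
      let last := (rest.takeWhile pvPos).foldl (fun _ x => x) e
      (pvSec e, pvSec last) :: pvScan ((rest.dropWhile pvPos).drop 1)
    else pvScan rest
termination_by l => l.length
decreasing_by
  · have h1 := List.length_dropWhile_le (p := pvPos) (l := rest)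
    simp at *; omega
  · simp

def consecutive_positive_windows_py_alt (sweep : List (List (String × Int))) : List (Int × Int) :=
  pvScan (PySem.List.sorted sweep pvSec false)

-- ===== PRECONDITION & SPEC =====
-- Pre_ excludes only entries missing the "seconds_remaining" or "ev_gain" key, on which Python A raises KeyError.
def Pre_consecutive_positive_windows_py (sweep : List (List (String × Int))) : Prop :=
  (sweep.all (fun e => (PySem.Dict.mk e).contains "seconds_remaining" &&
                       (PySem.Dict.mk e).contains "ev_gain")) = true
instance (sweep : List (List (String × Int))) : Decidable (Pre_consecutive_positive_windows_py sweep) := by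
  unfold Pre_consecutive_positive_windows_py; infer_instance

def pvWitness_consecutive_positive_windows_py : (List (List (String × Int))) :=
  [[("seconds_remaining", 3), ("ev_gain", 1)], [("seconds_remaining", 1), ("ev_gain", -1)]]

def Spec_consecutive_positive_windows_py (sweep : List (List (String × Int))) (out : List (Int × Int)) : Prop := out = consecutive_positive_windows_py_alt sweep
instance (sweep : List (List (String × Int))) (out : List (Int × Int)) : Decidable (Spec_consecutive_positive_windows_py sweep out) := by unfold Spec_consecutive_positive_windows_py; infer_instance

-- ===== CLAIM (what is proved, stated in full; the proofs are below) =====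
def Claim_equal_consecutive_positive_windows_py : Prop := ∀ (sweep : List (List (String × Int))), Dom_consecutive_positive_windows_py sweep → Pre_consecutive_positive_windows_py sweep → Spec_consecutive_positive_windows_py sweep (consecutive_positive_windows_py sweep)

-- ===== LEMMAS AND PROOFS =====

-- A's state machine while inside a window started at w with previous second p
def pvExt : List (List (String × Int)) → Int → Int → List (Int × Int)
  | [], w, p => [(w, p)]
  | e :: rest, w, _p => if pvPos e then pvExt rest w (pvSec e) else (w, _p) :: pvScan rest
termination_by l => l.length

def pvFinish (st : List (Int × Int) × Bool × Int × Int) : List (Int × Int) :=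
  if st.2.1 then st.1 ++ [(st.2.2.1, st.2.2.2)] else st.1

lemma pvExt_eq : ∀ (rest : List (List (String × Int))) (w : Int) (e : List (String × Int)),
    pvExt rest w (pvSec e) =
      (w, pvSec ((rest.takeWhile pvPos).foldl (fun _ x => x) e)) ::
        pvScan ((rest.dropWhile pvPos).drop 1) := by
  intro rest
  induction rest with
  | nil => intro w e; simp [pvExt, pvScan]
  | cons e' r ih =>
    intro w e
    by_cases h : pvPos e' = true
    · simpa [pvExt, h] using ih w e'
    · have hf : pvPos e' = false := by simpa using h
      simp [pvExt, hf]

lemma pvScan_pos {e : List (String × Int)} (rest : List (List (String × Int)))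
    (h : pvPos e = true) : pvScan (e :: rest) = pvExt rest (pvSec e) (pvSec e) := by
  rw [pvExt_eq]
  simp [pvScan, h]

lemma pvLoop : ∀ (l : List (List (String × Int))),
    (∀ ws w p, pvFinish (l.foldl pvStepA (ws, false, w, p)) = ws ++ pvScan l)
    ∧ (∀ ws w p, pvFinish (l.foldl pvStepA (ws, true, w, p)) = ws ++ pvExt l w p) := by
  intro l
  induction l with
  | nil =>
    exact ⟨fun ws w p => by simp [pvFinish, pvScan],
           fun ws w p => by simp [pvFinish, pvExt]⟩
  | cons e rest ih =>
    constructor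
    · intro ws w p
      rw [List.foldl_cons]
      by_cases h : pvPos e = true
      · have hg : pvGain e > 0 := by simpa [pvPos] using h
        rw [show pvStepA (ws, false, w, p) e = (ws, true, pvSec e, pvSec e) from by
          simp [pvStepA, hg]]
        rw [ih.2, pvScan_pos rest h]
      · have hg : ¬ pvGain e > 0 := by simpa [pvPos] using h
        rw [show pvStepA (ws, false, w, p) e = (ws, false, w, pvSec e) from by
          simp [pvStepA, hg]]
        rw [ih.1]
        have hf : pvPos e = false := by simpa using h
        simp [pvScan, hf]
    · intro ws w p
      rw [List.foldl_cons]
      by_cases h : pvPos e = true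
      · have hg : pvGain e > 0 := by simpa [pvPos] using h
        have hle : ¬ pvGain e ≤ 0 := not_le.mpr hg
        rw [show pvStepA (ws, true, w, p) e = (ws, true, w, pvSec e) from by
          simp [pvStepA, hle]]
        rw [ih.2]
        simp [pvExt, h]
      · have hng : ¬ pvGain e > 0 := by simpa [pvPos] using h
        have hle : pvGain e ≤ 0 := not_lt.mp hng
        rw [show pvStepA (ws, true, w, p) e = (ws ++ [(w, p)], false, w, pvSec e) from by
          simp [pvStepA, hng, hle]]
        rw [ih.1]
        have hf : pvPos e = false := by simpa using h
        simp [pvExt, hf, List.append_assoc]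

-- ===== VERDICT (by name: the statement is the Claim_ definition above) =====
theorem consecutive_positive_windows_py_spec : Claim_equal_consecutive_positive_windows_py := by
  intro sweep _ _
  show consecutive_positive_windows_py sweep = consecutive_positive_windows_py_alt sweep
  unfold consecutive_positive_windows_py consecutive_positive_windows_py_alt
  simpa [pvFinish] using (pvLoop (PySem.List.sorted sweep pvSec false)).1 [] 0 0
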